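-- pv_equiv track=rewrite | github.com/SoheilSaya/Unlim-challenges | ramznegari adad.py | numbers_within_numbers
-- ===== SOURCE A (Python) =====
-- def numbers_within_numbers(n):
--     n_str = str(n)
--     result = ''
--     count = 1
--
--     for i in range(1, len(n_str)):
--         if n_str[i] == n_str[i-1]:
--             count += 1
--         else:
--             result += str(count) + n_str[i-1]
--             count = 1
--
--     result += str(count) + n_str[-1]
--
--     if int(result) % 2 == 0:
--         return int(result) // 2
--     else:
--         return int(result) * 3
-- ===== SOURCE B (Python) =====
-- def numbers_within_numbers(n):
--     # recursive, right-to-left: strip the trailing run with rstrip, recurse on the rest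
--     def encode(s):
--         if not s:
--             return ''
--         run = len(s) - len(s.rstrip(s[-1]))
--         return encode(s[:-run]) + str(run) + s[-1]
--
--     r = int(encode(str(n)))
--     return r // 2 if r % 2 == 0 else r * 3
-- ===== Notes on version B (the rewrite author's own statement) =====
-- stated objective: alternative
-- what changed: B replaces A's iterative left-to-right previous-char/counter state machine by a recursive right-to-left decomposition: each step measures the whole trailing run at once with s.rstrip(s[-1]) and recurses on the remaining prefix, assembling the encoded string back-to-front; Pre_ excludes negative n, on which both A and B raise ValueError (int() of an encoding containing '-').
import Mathlib
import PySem

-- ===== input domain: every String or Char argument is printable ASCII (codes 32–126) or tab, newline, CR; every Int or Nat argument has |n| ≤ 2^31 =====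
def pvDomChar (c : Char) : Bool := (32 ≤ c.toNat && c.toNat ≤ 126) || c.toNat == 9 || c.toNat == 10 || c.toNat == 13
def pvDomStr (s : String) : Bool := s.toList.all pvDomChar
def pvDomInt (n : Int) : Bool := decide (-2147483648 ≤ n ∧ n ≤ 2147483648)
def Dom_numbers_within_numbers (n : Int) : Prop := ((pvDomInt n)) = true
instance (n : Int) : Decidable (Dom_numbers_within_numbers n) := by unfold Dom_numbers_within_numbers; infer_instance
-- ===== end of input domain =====

-- B replaces A's iterative left-to-right counter state machine by a recursive
-- right-to-left decomposition: each step strips the whole trailing run with rstrip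
-- and recurses on the remaining prefix; same return value on all n ≥ 0 (Pre_).

-- ===== PORT A =====
def numbers_within_numbers (n : Int) : Int :=
  let nstr := PySem.Int.toChars n
  let st := (PySem.List.pyRange 1 (nstr.length : Int) 1).foldl
    (fun (st : List Char × Int) i =>
      if PySem.List.pyGetD nstr i ' ' == PySem.List.pyGetD nstr (i - 1) ' ' then
        (st.1, st.2 + 1)
      else
        (st.1 ++ PySem.Int.toChars st.2 ++ [PySem.List.pyGetD nstr (i - 1) ' '], 1))
    ([], 1)
  let result := st.1 ++ PySem.Int.toChars st.2 ++ [PySem.List.pyGetD nstr (-1) ' ']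
  match PySem.Int.ofChars? result with
  | some r => if PySem.Int.mod r 2 == 0 then PySem.Int.floordiv r 2 else r * 3
  | none => 0  -- unreachable under Pre_ (Python raises ValueError there)

-- ===== PORT B =====
-- hand port of s.rstrip(chars) (PySem has no rstrip-with-argument): drop trailing
-- characters contained in `chars`; exact for every input
def pvRstrip (cs chars : List Char) : List Char :=
  (cs.reverse.dropWhile (fun c => chars.contains c)).reverse

-- termination of `encode`: rstrip by the last character drops at least that character
lemma pvRstrip_last_lt (cs : List Char) (h : cs ≠ []) :
    (pvRstrip cs [PySem.List.pyGetD cs (-1) ' ']).length < cs.length := by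
  rw [PySem.List.pyGetD_neg_one cs ' ' h]
  obtain ⟨a, t, hat⟩ := List.exists_cons_of_ne_nil (show cs.reverse ≠ [] by simpa using h)
  have hcs : cs = t.reverse ++ [a] := by
    have := congrArg List.reverse hat
    simpa using this
  have ha : a = cs.getLast h := by
    have h1 : cs.getLast? = some a := by rw [hcs]; exact List.getLast?_concat
    have h2 := List.getLast?_eq_some_getLast h
    rw [h1] at h2
    exact Option.some.inj h2
  have hlen : cs.length = t.length + 1 := by
    have := congrArg List.length hat
    simpa using this
  unfold pvRstrip
  rw [hat]
  have hstep : List.dropWhile (fun c => ([cs.getLast h] : List Char).contains c) (a :: t)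
      = List.dropWhile (fun c => ([cs.getLast h] : List Char).contains c) t := by
    rw [List.dropWhile_cons, if_pos (by simp [ha])]
  rw [hstep]
  have := List.length_dropWhile_le (fun c => ([cs.getLast h] : List Char).contains c) t
  simp only [List.length_reverse]
  omega

-- Source B's inner `encode`: if s is empty return ''; else measure the trailing run with
-- rstrip, recurse on s[:-run], and append str(run) + s[-1]
def pvEncode (cs : List Char) : List Char :=
  if h : cs = [] then []
  else
    let last := PySem.List.pyGetD cs (-1) ' '
    let run : Nat := cs.length - (pvRstrip cs [last]).length
    pvEncode (PySem.List.slice cs none (some (-(run : Int)))) ++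
      PySem.Int.toChars (run : Int) ++ [last]
  termination_by cs.length
  decreasing_by
    have hlt := pvRstrip_last_lt cs h
    have hrun : 0 < cs.length - (pvRstrip cs [PySem.List.pyGetD cs (-1) ' ']).length := by omega
    rw [PySem.List.slice_to_neg_natCast cs _ hrun]
    have hne : cs.length ≠ 0 := fun h0 => h (List.eq_nil_of_length_eq_zero h0)
    simp only [List.length_take]
    omega

def numbers_within_numbers_alt (n : Int) : Int :=
  match PySem.Int.ofChars? (pvEncode (PySem.Int.toChars n)) with
  | some r => if PySem.Int.mod r 2 == 0 then PySem.Int.floordiv r 2 else r * 3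
  | none => 0  -- unreachable under Pre_ (Python raises ValueError there)

-- ===== PRECONDITION & SPEC =====
-- Pre_ excludes negative n: there str(n) starts with '-', the run-length string contains '-'
-- in the middle, and Python's int() raises ValueError (in A and in B alike).
def Pre_numbers_within_numbers (n : Int) : Prop := 0 ≤ n
instance (n : Int) : Decidable (Pre_numbers_within_numbers n) := by unfold Pre_numbers_within_numbers; infer_instance
def pvWitness_numbers_within_numbers : Int := 7

def Spec_numbers_within_numbers (n : Int) (out : Int) : Prop := out = numbers_within_numbers_alt n
instance (n : Int) (out : Int) : Decidable (Spec_numbers_within_numbers n out) := by unfold Spec_numbers_within_numbers; infer_instance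

-- ===== CLAIM (what is proved, stated in full; the proofs are below) =====
def Claim_equal_numbers_within_numbers : Prop := ∀ (n : Int), Dom_numbers_within_numbers n → Pre_numbers_within_numbers n → Spec_numbers_within_numbers n (numbers_within_numbers n)

-- ===== LEMMAS AND PROOFS =====

-- proof-side view of the run-length encoding: the runs of cs, front to back
def pvRuns : List Char → List (Char × Nat)
  | [] => []
  | c :: rest =>
      (c, (rest.takeWhile (fun x => x == c)).length + 1) ::
        pvRuns (rest.dropWhile (fun x => x == c))
  termination_by cs => cs.length
  decreasing_by
    simp only [List.length_cons]
    exact Nat.lt_succ_of_le (List.length_dropWhile_le _ _)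

-- the encoded string of a run list
def pvEmit (rs : List (Char × Nat)) : List Char :=
  (rs.map (fun rc => PySem.Int.toChars (rc.2 : Int) ++ [rc.1])).flatten

-- A's loop as a structural state machine over the remaining characters
def pvStepA : List Char → Char → Int → List Char → List Char
  | [], prev, count, acc => acc ++ PySem.Int.toChars count ++ [prev]
  | c :: rest, prev, count, acc =>
      if c == prev then pvStepA rest c (count + 1) acc
      else pvStepA rest c 1 (acc ++ PySem.Int.toChars count ++ [prev])

-- A's trailing emit
def pvFinish (cs : List Char) (st : List Char × Int) : List Char :=
  st.1 ++ PySem.Int.toChars st.2 ++ [PySem.List.pyGetD cs (-1) ' ']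

lemma pv_toDigitsCore_ne_nil (b : Nat) : ∀ (f n : Nat) (ds : List Char),
    ds ≠ [] → Nat.toDigitsCore b f n ds ≠ [] := by
  intro f
  induction f with
  | zero => intro n ds h; simpa [Nat.toDigitsCore] using h
  | succ f ih =>
    intro n ds h
    simp only [Nat.toDigitsCore]
    split
    · simp
    · exact ih (n / b) _ (by simp)

lemma pv_toChars_ne_nil (n : Int) : PySem.Int.toChars n ≠ [] := by
  have hcore : ∀ m : Nat, Nat.toDigits 10 m ≠ [] := by
    intro m
    unfold Nat.toDigits
    simp only [Nat.toDigitsCore]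
    split
    · simp
    · exact pv_toDigitsCore_ne_nil 10 m (m / 10) _ (by simp)
  unfold PySem.Int.toChars
  split
  · simp
  · exact hcore _

lemma pv_takeWhile_replicate_append {c prev : Char} (h : (c == prev) = false)
    (m : Nat) (rest : List Char) :
    (List.replicate m prev ++ c :: rest).takeWhile (fun x => x == prev)
      = List.replicate m prev := by
  induction m with
  | zero => simp [h]
  | succ k ih => simp [List.replicate_succ, ih]

lemma pv_dropWhile_replicate_append {c prev : Char} (h : (c == prev) = false)
    (m : Nat) (rest : List Char) :
    (List.replicate m prev ++ c :: rest).dropWhile (fun x => x == prev)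
      = c :: rest := by
  induction m with
  | zero => simp [h]
  | succ k ih => simpa [List.replicate_succ, List.dropWhile] using ih

lemma pvRuns_replicate_nil (prev : Char) (k : Nat) :
    pvRuns (List.replicate (k + 1) prev) = [(prev, k + 1)] := by
  simp [pvRuns, List.replicate_succ]

lemma pvRuns_replicate_cons {c prev : Char} (h : (c == prev) = false)
    (k : Nat) (rest : List Char) :
    pvRuns (List.replicate (k + 1) prev ++ c :: rest)
      = (prev, k + 1) :: pvRuns (c :: rest) := by
  rw [List.replicate_succ, List.cons_append]
  simp only [pvRuns, pv_takeWhile_replicate_append h, pv_dropWhile_replicate_append h,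
    List.length_replicate]

-- A's state machine emits exactly the runs, one run ahead
lemma pv_stepA_eq_runs : ∀ (rest : List Char) (prev : Char) (m : Nat) (acc : List Char),
    1 ≤ m →
    pvStepA rest prev (m : Int) acc = acc ++ pvEmit (pvRuns (List.replicate m prev ++ rest)) := by
  intro rest
  induction rest with
  | nil =>
    intro prev m acc hm
    obtain ⟨k, rfl⟩ : ∃ k, m = k + 1 := ⟨m - 1, by omega⟩
    simp [pvStepA, pvRuns_replicate_nil, pvEmit]
  | cons c rest' ih =>
    intro prev m acc hm
    by_cases h : (c == prev) = true
    · have hc : c = prev := by exact eq_of_beq h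
      subst hc
      rw [pvStepA]
      simp only [h, if_true]
      have hcast : ((m : Int) + 1) = ((m + 1 : Nat) : Int) := by push_cast; ring
      rw [hcast, ih c (m + 1) acc (by omega)]
      have hrep : List.replicate m c ++ c :: rest' = List.replicate (m + 1) c ++ rest' := by
        rw [List.replicate_succ']; simp
      rw [hrep]
    · have h' : (c == prev) = false := by simpa using h
      rw [pvStepA]
      simp only [h', if_neg Bool.false_ne_true]
      have hih := ih c 1 (acc ++ PySem.Int.toChars (m : Int) ++ [prev]) (le_refl 1)
      rw [Nat.cast_one] at hih
      rw [hih]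
      obtain ⟨k, rfl⟩ : ∃ k, m = k + 1 := ⟨m - 1, by omega⟩
      have hrep1 : List.replicate 1 c ++ rest' = c :: rest' := by simp
      rw [hrep1, pvRuns_replicate_cons h']
      simp [pvEmit]

-- A's index fold over range(1, len) computes the state machine
lemma pv_foldA_eq : ∀ (k : Nat) (cs : List Char) (j : Nat) (acc : List Char) (count : Int),
    cs.length - j = k → 1 ≤ j → j ≤ cs.length →
    pvFinish cs ((PySem.List.pyRange (j : Int) (cs.length : Int) 1).foldl
      (fun (st : List Char × Int) i =>
        if PySem.List.pyGetD cs i ' ' == PySem.List.pyGetD cs (i - 1) ' ' then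
          (st.1, st.2 + 1)
        else
          (st.1 ++ PySem.Int.toChars st.2 ++ [PySem.List.pyGetD cs (i - 1) ' '], 1))
      (acc, count))
      = pvStepA (cs.drop j) (cs.getD (j - 1) ' ') count acc := by
  intro k
  induction k with
  | zero =>
    intro cs j acc count hk h1 h2
    have hj : j = cs.length := by omega
    subst hj
    have hne : cs ≠ [] := by
      intro h; rw [h] at h1; simp at h1
    rw [PySem.List.pyRange_one_eq_nil (le_refl _)]
    simp only [List.foldl_nil, pvFinish, List.drop_length, pvStepA]
    have hlt : cs.length - 1 < cs.length := by omega
    rw [PySem.List.pyGetD_neg_one cs ' ' hne, List.getLast_eq_getElem hne,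
      List.getD_eq_getElem cs ' ' hlt]
  | succ k ih =>
    intro cs j acc count hk h1 h2
    have hj : j < cs.length := by omega
    rw [PySem.List.pyRange_one_cons (by exact_mod_cast hj), List.foldl_cons]
    have hgj : PySem.List.pyGetD cs (j : Int) ' ' = cs[j] := by
      rw [PySem.List.pyGetD_natCast, List.getD_eq_getElem cs ' ' hj]
    have hcast : ((j : Int) - 1) = ((j - 1 : Nat) : Int) := by omega
    have hgj1 : PySem.List.pyGetD cs ((j : Int) - 1) ' ' = cs.getD (j - 1) ' ' := by
      rw [hcast, PySem.List.pyGetD_natCast]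
    have hcast2 : ((j : Int) + 1) = ((j + 1 : Nat) : Int) := by omega
    have hdrop : cs.drop j = cs[j] :: cs.drop (j + 1) := List.drop_eq_getElem_cons hj
    have hgd : cs.getD ((j + 1) - 1) ' ' = cs[j] := by
      rw [Nat.add_sub_cancel, List.getD_eq_getElem cs ' ' hj]
    rw [hdrop, pvStepA]
    simp only [hgj, hgj1]
    by_cases h : (cs[j] == cs.getD (j - 1) ' ') = true
    · simp only [h, if_true]
      rw [hcast2, ih cs (j + 1) acc (count + 1) (by omega) (by omega) (by omega), hgd]
    · have h' : (cs[j] == cs.getD (j - 1) ' ') = false := by simpa using h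
      simp only [h', if_neg Bool.false_ne_true]
      rw [hcast2, ih cs (j + 1) (acc ++ PySem.Int.toChars count ++ [cs.getD (j - 1) ' '])
        1 (by omega) (by omega) (by omega), hgd]

lemma pv_result_eq (cs : List Char) (hne : cs ≠ []) :
    pvFinish cs ((PySem.List.pyRange 1 (cs.length : Int) 1).foldl
      (fun (st : List Char × Int) i =>
        if PySem.List.pyGetD cs i ' ' == PySem.List.pyGetD cs (i - 1) ' ' then
          (st.1, st.2 + 1)
        else
          (st.1 ++ PySem.Int.toChars st.2 ++ [PySem.List.pyGetD cs (i - 1) ' '], 1))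
      ([], 1))
      = pvEmit (pvRuns cs) := by
  have hlen : 1 ≤ cs.length := by
    cases cs with
    | nil => exact absurd rfl hne
    | cons a t => simp
  have h1 := pv_foldA_eq (cs.length - 1) cs 1 [] 1 rfl (le_refl 1) hlen
  simp only [Nat.cast_one, Nat.sub_self] at h1
  rw [h1]
  have h2 := pv_stepA_eq_runs (cs.drop 1) (cs.getD 0 ' ') 1 [] (le_refl 1)
  rw [Nat.cast_one] at h2
  rw [h2]
  have h3 : List.replicate 1 (cs.getD 0 ' ') ++ cs.drop 1 = cs := by
    cases cs with
    | nil => exact absurd rfl hne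
    | cons a t => simp
  rw [h3]
  simp

-- appending one final run to a string that does not end in its character
lemma pvRuns_append_replicate : ∀ (N : Nat) (ys : List Char) (c : Char) (k : Nat),
    ys.length ≤ N → 1 ≤ k → (∀ x, ys.getLast? = some x → x ≠ c) →
    pvRuns (ys ++ List.replicate k c) = pvRuns ys ++ [(c, k)] := by
  intro N
  induction N with
  | zero =>
    intro ys c k hN hk _
    obtain rfl : ys = [] := List.eq_nil_of_length_eq_zero (by omega)
    obtain ⟨m, rfl⟩ : ∃ m, k = m + 1 := ⟨k - 1, by omega⟩
    rw [List.nil_append, pvRuns_replicate_nil c m]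
    simp [pvRuns]
  | succ N ih =>
    intro ys c k hN hk hlast
    match ys with
    | [] =>
      obtain ⟨m, rfl⟩ : ∃ m, k = m + 1 := ⟨k - 1, by omega⟩
      rw [List.nil_append, pvRuns_replicate_nil c m]
      simp [pvRuns]
    | d :: t =>
      rw [List.cons_append]
      simp only [pvRuns]
      by_cases hall : t.all (fun x => x == d) = true
      · -- ys is a single run of d, and d ≠ c since ys must not end in c
        have hrep : d :: t = List.replicate (t.length + 1) d := by
          rw [List.eq_replicate_iff]
          refine ⟨by simp, ?_⟩
          intro b hb
          rcases List.mem_cons.mp hb with rfl | hb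
          · rfl
          · exact eq_of_beq (by simpa using List.all_eq_true.mp hall b hb)
        have hdc : d ≠ c := by
          apply hlast d
          rw [hrep, List.getLast?_replicate]
          simp
        have hcd : (c == d) = false := by
          simpa using fun hcd => hdc (eq_of_beq hcd).symm
        have htall' : (t.takeWhile (fun x => x == d)).length = t.length := by
          rw [List.takeWhile_eq_self_iff.mpr (fun x hx => List.all_eq_true.mp hall x hx)]
        have hdnil : t.dropWhile (fun x => x == d) = [] :=
          List.dropWhile_eq_nil_iff.mpr (fun x hx => List.all_eq_true.mp hall x hx)
        have htkr : (List.replicate k c).takeWhile (fun x => x == d) = [] := by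
          cases k with
          | zero => simp
          | succ m => simp [List.replicate_succ, hcd]
        have htk : (t ++ List.replicate k c).takeWhile (fun x => x == d) = t := by
          rw [List.takeWhile_append, if_pos htall', htkr, List.append_nil]
        have hdk : (t ++ List.replicate k c).dropWhile (fun x => x == d)
            = List.replicate k c := by
          rw [List.dropWhile_append, if_pos (by simp [hdnil])]
          cases k with
          | zero => simp
          | succ m => simp [List.replicate_succ, hcd]
        obtain ⟨m, rfl⟩ : ∃ m, k = m + 1 := ⟨k - 1, by omega⟩
        rw [htk, hdk, hdnil, pvRuns_replicate_nil c m, htall']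
        simp [pvRuns]
      · -- the first run of ys ends inside t
        have hallf : t.all (fun x => x == d) = false := by simpa using hall
        have htne : (t.takeWhile (fun x => x == d)).length ≠ t.length := by
          intro h0
          have heq := (List.takeWhile_prefix (p := fun x => x == d) (l := t)).eq_of_length h0
          have : t.all (fun x => x == d) = true :=
            List.all_eq_true.mpr (List.takeWhile_eq_self_iff.mp heq)
          rw [this] at hallf
          exact absurd hallf (by simp)
        have hdne : t.dropWhile (fun x => x == d) ≠ [] := by
          intro h0
          have : t.all (fun x => x == d) = true :=
            List.all_eq_true.mpr (List.dropWhile_eq_nil_iff.mp h0)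
          rw [this] at hallf
          exact absurd hallf (by simp)
        have htk : (t ++ List.replicate k c).takeWhile (fun x => x == d)
            = t.takeWhile (fun x => x == d) := by
          rw [List.takeWhile_append, if_neg htne]
        have hdk : (t ++ List.replicate k c).dropWhile (fun x => x == d)
            = t.dropWhile (fun x => x == d) ++ List.replicate k c := by
          rw [List.dropWhile_append, if_neg (by simpa [List.isEmpty_iff] using hdne)]
        have hlast' : ∀ x, (t.dropWhile (fun x => x == d)).getLast? = some x → x ≠ c := by
          intro x hx
          apply hlast x
          obtain ⟨pre, hpre⟩ : t.dropWhile (fun x => x == d) <:+ d :: t :=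
            (List.dropWhile_suffix _).trans (List.suffix_cons d t)
          rw [← hpre, List.getLast?_append_of_ne_nil pre hdne]
          exact hx
        have hlen' : (t.dropWhile (fun x => x == d)).length ≤ N := by
          have := List.length_dropWhile_le (fun x => x == d) t
          simp only [List.length_cons] at hN
          omega
        rw [htk, hdk, ih _ c k hlen' hk hlast']
        simp

lemma pvEmit_append_singleton (rs : List (Char × Nat)) (c : Char) (k : Nat) :
    pvEmit (rs ++ [(c, k)]) = pvEmit rs ++ PySem.Int.toChars (k : Int) ++ [c] := by
  simp [pvEmit]

-- B's recursive encoder equals the encoding of the runs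
lemma pv_encode_eq_emit : ∀ (N : Nat) (cs : List Char), cs.length ≤ N →
    pvEncode cs = pvEmit (pvRuns cs) := by
  intro N
  induction N with
  | zero =>
    intro cs hN
    obtain rfl : cs = [] := List.eq_nil_of_length_eq_zero (by omega)
    simp [pvEncode, pvRuns, pvEmit]
  | succ N ih =>
    intro cs hN
    by_cases h : cs = []
    · subst h; simp [pvEncode, pvRuns, pvEmit]
    · have hc := PySem.List.pyGetD_neg_one cs ' ' h
      set c := cs.getLast h with hcdef
      set p : Char → Bool := fun x => ([c] : List Char).contains x with hp
      set k := (cs.reverse.takeWhile p).length with hkdef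
      set ys := (cs.reverse.dropWhile p).reverse with hysdef
      have htkrep : cs.reverse.takeWhile p = List.replicate k c := by
        rw [List.eq_replicate_iff]
        refine ⟨rfl, ?_⟩
        intro b hb
        have := List.mem_takeWhile_imp hb
        simpa [hp] using this
      have hcs : cs = ys ++ List.replicate k c := by
        conv_lhs => rw [← List.reverse_reverse cs,
          ← List.takeWhile_append_dropWhile (p := p) (l := cs.reverse)]
        rw [List.reverse_append, htkrep, List.reverse_replicate, ← hysdef]
      have hlenk : cs.length = ys.length + k := by
        have := congrArg List.length hcs
        simpa using this
      have hk1 : 0 < k := by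
        obtain ⟨a, t, hat⟩ := List.exists_cons_of_ne_nil (show cs.reverse ≠ [] by simpa using h)
        have ha : a = c := by
          have h1 : cs.getLast? = some a := by
            have hca : cs = t.reverse ++ [a] := by
              have := congrArg List.reverse hat
              simpa using this
            rw [hca]; exact List.getLast?_concat
          have h2 := List.getLast?_eq_some_getLast h
          rw [h1] at h2
          exact Option.some.inj h2
        have hpa : p a = true := by simp [hp, ha]
        rw [hkdef, hat, List.takeWhile_cons, if_pos hpa]
        simp
      have hyslast : ∀ x, ys.getLast? = some x → x ≠ c := by
        intro x hx hxc
        have hw : cs.reverse.dropWhile p ≠ [] := by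
          intro h0
          rw [hysdef, h0] at hx
          simp at hx
        have hhead : (cs.reverse.dropWhile p).head? = some x := by
          rw [← List.getLast?_reverse, ← hysdef]
          exact hx
        have hpf := List.head_dropWhile_not p (l := cs.reverse) hw
        have hhx : (cs.reverse.dropWhile p).head hw = x := by
          have := List.head?_eq_some_head hw
          rw [hhead] at this
          exact (Option.some.inj this).symm
        rw [hhx, hp, hxc] at hpf
        simp at hpf
      have hrs : pvRstrip cs [c] = ys := by
        rw [hysdef]; rfl
      rw [pvEncode, dif_neg h]
      simp only [hc, hrs]
      rw [show cs.length - ys.length = k from by omega,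
        PySem.List.slice_to_neg_natCast cs k hk1,
        show cs.length - k = ys.length from by omega]
      rw [hcs, List.take_left,
        pvRuns_append_replicate ys.length ys c k (le_refl _) hk1 hyslast,
        pvEmit_append_singleton,
        ih ys (by omega)]

-- the two encoded strings coincide, hence so do the two results
lemma pv_main (n : Int) : numbers_within_numbers n = numbers_within_numbers_alt n := by
  simp only [numbers_within_numbers, numbers_within_numbers_alt]
  have key := pv_result_eq (PySem.Int.toChars n) (pv_toChars_ne_nil n)
  have kb := pv_encode_eq_emit (PySem.Int.toChars n).length (PySem.Int.toChars n) (le_refl _)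
  unfold pvFinish at key
  rw [key, kb]

-- ===== VERDICT (by name: the statement is the Claim_ definition above) =====
theorem numbers_within_numbers_spec : Claim_equal_numbers_within_numbers := by
  intro n _ _
  unfold Spec_numbers_within_numbers
  exact pv_main n
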